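-- pv_equiv track=rewrite | github.com/ScarletPan/ML-Camp-BurnMyGpu | titletrigger/textsum/scripts/eval.py | turn2idx
-- ===== SOURCE A (Python) =====
-- def turn2idx(candidates, references):
--     cand_tokens = [line.split(" ") for line in candidates]
--     ref_tokens = [line.split(" ") for line in references]
--     vocab = {}
--     cnt = 0
--     cand_idxes = []
--     for tokens in cand_tokens:
--         tmp_idxes = []
--         for token in tokens:
--             if token not in vocab:
--                 vocab[token] = cnt
--                 cnt += 1
--             tmp_idxes.append(vocab[token])
--         cand_idxes.append(tmp_idxes)
--     ref_idxes = []
--     for tokens in ref_tokens: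
--         tmp_idxes = []
--         for token in tokens:
--             if token not in vocab:
--                 vocab[token] = cnt
--                 cnt += 1
--             tmp_idxes.append(vocab[token])
--         ref_idxes.append(tmp_idxes)
--     candidates = [" ".join([str(idx) for idx in idxes])
--                  for idxes in cand_idxes]
--     references = [" ".join([str(idx) for idx in idxes])
--                  for idxes in ref_idxes]
--     return candidates, references
-- ===== SOURCE B (Python) =====
-- def turn2idx(candidates, references):
--     cand_tokens = [line.split(" ") for line in candidates]
--     ref_tokens = [line.split(" ") for line in references]
--     # Pass 1: build the full vocab (candidates first, then references,
--     # preserving first-appearance order).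
--     vocab = {}
--     for tokens in cand_tokens + ref_tokens:
--         for token in tokens:
--             if token not in vocab:
--                 vocab[token] = len(vocab)
--     # Pass 2: lookup-only encoding.
--     def encode(tokens):
--         return " ".join(str(vocab[t]) for t in tokens)
--     return [encode(t) for t in cand_tokens], [encode(t) for t in ref_tokens]
-- ===== Notes on version B (the rewrite author's own statement) =====
-- stated objective: simpler
-- what changed: B separates the work into two passes: first it builds the whole vocab (candidates then references, first-appearance order, index = len(vocab)), then a lookup-only pass encodes every token list; A interleaves insertion and encoding in one pass with an explicit counter and accumulator lists.
import Mathlib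
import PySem

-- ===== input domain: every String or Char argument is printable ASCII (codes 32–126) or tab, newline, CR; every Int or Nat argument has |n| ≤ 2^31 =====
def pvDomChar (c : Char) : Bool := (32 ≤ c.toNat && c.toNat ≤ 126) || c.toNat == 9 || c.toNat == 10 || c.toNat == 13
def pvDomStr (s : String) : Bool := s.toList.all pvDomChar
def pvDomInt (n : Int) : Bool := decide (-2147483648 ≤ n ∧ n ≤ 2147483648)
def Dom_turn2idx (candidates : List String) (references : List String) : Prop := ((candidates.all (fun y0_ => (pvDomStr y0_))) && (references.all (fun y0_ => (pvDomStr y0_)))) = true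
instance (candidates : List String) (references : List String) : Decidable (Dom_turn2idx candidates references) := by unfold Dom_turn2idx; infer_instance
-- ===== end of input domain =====

-- B builds the whole vocab in one pass (index = len(vocab)) and then encodes with a
-- lookup-only second pass, instead of A's single interleaved insert-and-encode loop.

-- ===== PORT A =====
-- inner loop body of A: update (vocab, cnt), then append vocab[token]
-- (vocab[token] is always present here, so '.getD token 0' is exact)
def aEncTok (st : (PySem.Dict String Int × Int) × List Int) (token : String) :
    (PySem.Dict String Int × Int) × List Int :=
  let vc := if st.1.1.contains token then st.1 else (st.1.1.insert token st.1.2, st.1.2 + 1)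
  (vc, st.2 ++ [vc.1.getD token 0])

-- outer loop body of A: encode one token list, append its index list
def aEncLine (st : (PySem.Dict String Int × Int) × List (List Int)) (tokens : List String) :
    (PySem.Dict String Int × Int) × List (List Int) :=
  let r := tokens.foldl aEncTok (st.1, [])
  (r.1, st.2 ++ [r.2])

def turn2idx (candidates : List String) (references : List String) : List String × List String :=
  -- line.split(" "): sep ≠ "" so split? is always some; '.getD []' is exact
  let cand_tokens := candidates.map (fun line => (PySem.Str.split? line " ").getD [])
  let ref_tokens := references.map (fun line => (PySem.Str.split? line " ").getD [])
  let s1 := cand_tokens.foldl aEncLine ((PySem.Dict.empty, 0), [])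
  let s2 := ref_tokens.foldl aEncLine (s1.1, [])
  (s1.2.map (fun idxes => PySem.Str.join " " (idxes.map (fun idx => PySem.Int.toStr idx))),
   s2.2.map (fun idxes => PySem.Str.join " " (idxes.map (fun idx => PySem.Int.toStr idx))))

-- ===== PORT B =====
-- pass-1 body: insert each unseen token with index len(vocab)
def bAddTok (d : PySem.Dict String Int) (token : String) : PySem.Dict String Int :=
  if d.contains token then d else d.insert token (Int.ofNat d.size)

def bBuildLine (d : PySem.Dict String Int) (tokens : List String) : PySem.Dict String Int :=
  tokens.foldl bAddTok d

def turn2idx_alt (candidates : List String) (references : List String) : List String × List String :=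
  let cand_tokens := candidates.map (fun line => (PySem.Str.split? line " ").getD [])
  let ref_tokens := references.map (fun line => (PySem.Str.split? line " ").getD [])
  let vocab := (cand_tokens ++ ref_tokens).foldl bBuildLine PySem.Dict.empty
  -- pass 2: lookup only (every token is in vocab, so '.getD t 0' is exact)
  let encode := fun (tokens : List String) =>
    PySem.Str.join " " (tokens.map (fun t => PySem.Int.toStr (vocab.getD t 0)))
  (cand_tokens.map encode, ref_tokens.map encode)

-- ===== PRECONDITION & SPEC =====
def Spec_turn2idx (candidates : List String) (references : List String) (out : List String × List String) : Prop := out = turn2idx_alt candidates references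
instance (candidates : List String) (references : List String) (out : List String × List String) : Decidable (Spec_turn2idx candidates references out) := by unfold Spec_turn2idx; infer_instance

-- ===== CLAIM (what is proved, stated in full; the proofs are below) =====
def Claim_equal_turn2idx : Prop := ∀ (candidates : List String) (references : List String), Dom_turn2idx candidates references → Spec_turn2idx candidates references (turn2idx candidates references)

-- ===== LEMMAS AND PROOFS =====

-- the (vocab, cnt) evolution both programs share, extracted for the proof
def pairStep (dc : PySem.Dict String Int × Int) (token : String) : PySem.Dict String Int × Int :=
  if dc.1.contains token then dc else (dc.1.insert token dc.2, dc.2 + 1)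

def pairLine (dc : PySem.Dict String Int × Int) (tokens : List String) : PySem.Dict String Int × Int :=
  tokens.foldl pairStep dc

-- F preserves every binding of d
def DExt (d F : PySem.Dict String Int) : Prop := ∀ t i, d.get? t = some i → F.get? t = some i

theorem dext_refl (d : PySem.Dict String Int) : DExt d d := fun _ _ h => h

theorem dext_trans {d e F : PySem.Dict String Int} (h1 : DExt d e) (h2 : DExt e F) : DExt d F :=
  fun t i h => h2 t i (h1 t i h)

theorem dext_pairStep (dc : PySem.Dict String Int × Int) (token : String) :
    DExt dc.1 (pairStep dc token).1 := by
  unfold pairStep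
  split_ifs with hc
  · exact dext_refl _
  · intro t i h
    have hne : t ≠ token := by
      intro he; subst he
      rw [(PySem.Dict.get?_eq_none_iff_contains dc.1 t).2 (by simpa using hc)] at h
      simp at h
    simpa [PySem.Dict.get?_insert_of_ne _ _ hne] using h

theorem dext_foldTok (tokens : List String) (dc : PySem.Dict String Int × Int) :
    DExt dc.1 (tokens.foldl pairStep dc).1 := by
  induction tokens generalizing dc with
  | nil => exact dext_refl _
  | cons t ts ih =>
    exact dext_trans (dext_pairStep dc t) (by simpa using ih (pairStep dc t))

theorem dext_foldLine (lists : List (List String)) (dc : PySem.Dict String Int × Int) :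
    DExt dc.1 (lists.foldl pairLine dc).1 := by
  induction lists generalizing dc with
  | nil => exact dext_refl _
  | cons l ls ih =>
    exact dext_trans (dext_foldTok l dc) (by simpa [pairLine] using ih (pairLine dc l))

-- the token just processed is bound in the resulting dict
theorem pairStep_isSome (dc : PySem.Dict String Int × Int) (token : String) :
    ((pairStep dc token).1.get? token).isSome := by
  unfold pairStep
  split_ifs with hc
  · rw [← PySem.Dict.contains_eq_isSome_get?]; exact hc
  · simp [PySem.Dict.get?_insert_self]

-- A's inner loop: dict/cnt evolve by pairStep, and the emitted indices are
-- lookups in ANY later dict F that preserves the fold's bindings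
theorem aEncTok_fold (tokens : List String) (dc : PySem.Dict String Int × Int)
    (acc : List Int) (F : PySem.Dict String Int)
    (hF : DExt (tokens.foldl pairStep dc).1 F) :
    tokens.foldl aEncTok (dc, acc)
      = (tokens.foldl pairStep dc, acc ++ tokens.map (fun t => F.getD t 0)) := by
  induction tokens generalizing dc acc with
  | nil => simp
  | cons t ts ih =>
    have hstep : aEncTok (dc, acc) t
        = (pairStep dc t, acc ++ [(pairStep dc t).1.getD t 0]) := by
      simp [aEncTok, pairStep]
    have hsome : ((pairStep dc t).1.get? t).isSome := pairStep_isSome dc t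
    obtain ⟨v, hv⟩ := Option.isSome_iff_exists.1 hsome
    have hFt : F.get? t = some v := by
      refine hF t v ?_
      exact dext_foldTok ts (pairStep dc t) t v hv
    have hval : (pairStep dc t).1.getD t 0 = F.getD t 0 := by
      rw [PySem.Dict.getD_eq_get?_getD, PySem.Dict.getD_eq_get?_getD, hv, hFt]
    have hF' : DExt (ts.foldl pairStep (pairStep dc t)).1 F := by simpa using hF
    calc (t :: ts).foldl aEncTok (dc, acc)
        = ts.foldl aEncTok (pairStep dc t, acc ++ [(pairStep dc t).1.getD t 0]) := by
          rw [List.foldl_cons, hstep]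
      _ = (ts.foldl pairStep (pairStep dc t),
            (acc ++ [(pairStep dc t).1.getD t 0]) ++ ts.map (fun t => F.getD t 0)) :=
          ih (pairStep dc t) _ hF'
      _ = ((t :: ts).foldl pairStep dc, acc ++ (t :: ts).map (fun t => F.getD t 0)) := by
          simp [hval]

-- A's outer loop, same statement one level up
theorem aEncLine_fold (lists : List (List String)) (dc : PySem.Dict String Int × Int)
    (acc : List (List Int)) (F : PySem.Dict String Int)
    (hF : DExt (lists.foldl pairLine dc).1 F) :
    lists.foldl aEncLine (dc, acc)
      = (lists.foldl pairLine dc,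
         acc ++ lists.map (fun tokens => tokens.map (fun t => F.getD t 0))) := by
  induction lists generalizing dc acc with
  | nil => simp
  | cons l ls ih =>
    have hF' : DExt (ls.foldl pairLine (pairLine dc l)).1 F := by simpa [pairLine] using hF
    have hFl : DExt (l.foldl pairStep dc).1 F :=
      dext_trans (dext_foldLine ls (pairLine dc l)) hF'
    have hstep : aEncLine (dc, acc) l
        = (pairLine dc l, acc ++ [l.map (fun t => F.getD t 0)]) := by
      simp only [aEncLine, aEncTok_fold l dc [] F hFl, pairLine]
      simp
    calc (l :: ls).foldl aEncLine (dc, acc)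
        = ls.foldl aEncLine (pairLine dc l, acc ++ [l.map (fun t => F.getD t 0)]) := by
          rw [List.foldl_cons, hstep]
      _ = (ls.foldl pairLine (pairLine dc l),
            (acc ++ [l.map (fun t => F.getD t 0)])
              ++ ls.map (fun tokens => tokens.map (fun t => F.getD t 0))) := ih _ _ hF'
      _ = _ := by simp [pairLine]

-- B's build pass computes exactly the dict component of pairStep, with cnt = size
theorem bBuild_tok (tokens : List String) (dc : PySem.Dict String Int × Int)
    (h : dc.2 = Int.ofNat dc.1.size) :
    bBuildLine dc.1 tokens = (tokens.foldl pairStep dc).1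
      ∧ (tokens.foldl pairStep dc).2 = Int.ofNat (tokens.foldl pairStep dc).1.size := by
  induction tokens generalizing dc with
  | nil => exact ⟨rfl, h⟩
  | cons t ts ih =>
    have hstep : bAddTok dc.1 t = (pairStep dc t).1 := by
      unfold bAddTok pairStep
      split_ifs with hc
      · rfl
      · simp [h]
    have hsz : (pairStep dc t).2 = Int.ofNat (pairStep dc t).1.size := by
      unfold pairStep
      split_ifs with hc
      · exact h
      · simp [PySem.Dict.size_insert, hc, h]
    have := ih (pairStep dc t) hsz
    constructor
    · simpa [bBuildLine, hstep] using this.1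
    · simpa using this.2
theorem bBuild_line (lists : List (List String)) (dc : PySem.Dict String Int × Int)
    (h : dc.2 = Int.ofNat dc.1.size) :
    lists.foldl bBuildLine dc.1 = (lists.foldl pairLine dc).1
      ∧ (lists.foldl pairLine dc).2 = Int.ofNat (lists.foldl pairLine dc).1.size := by
  induction lists generalizing dc with
  | nil => exact ⟨rfl, h⟩
  | cons l ls ih =>
    have ht := bBuild_tok l dc h
    have := ih (pairLine dc l) (by simpa [pairLine] using ht.2)
    constructor
    · simpa [List.foldl_cons, pairLine, ht.1] using this.1
    · simpa [pairLine] using this.2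

-- ===== VERDICT (by name: the statement is the Claim_ definition above) =====
theorem turn2idx_spec : Claim_equal_turn2idx := by
  unfold Claim_equal_turn2idx
  intro candidates references _
  unfold Spec_turn2idx turn2idx turn2idx_alt
  set candT := candidates.map (fun line => (PySem.Str.split? line " ").getD []) with hcandT
  set refT := references.map (fun line => (PySem.Str.split? line " ").getD []) with hrefT
  have h0 : ((PySem.Dict.empty : PySem.Dict String Int), (0 : Int)).2
      = Int.ofNat ((PySem.Dict.empty : PySem.Dict String Int), (0 : Int)).1.size := by
    simp [PySem.Dict.size_empty]
  set P1 := candT.foldl pairLine ((PySem.Dict.empty : PySem.Dict String Int), (0 : Int)) with hP1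
  set Pall := refT.foldl pairLine P1 with hPall
  -- B's vocab is Pall's dict
  have hvocab : (candT ++ refT).foldl bBuildLine PySem.Dict.empty = Pall.1 := by
    have := (bBuild_line (candT ++ refT) ((PySem.Dict.empty : PySem.Dict String Int), 0) h0).1
    simpa [List.foldl_append, hP1, hPall] using this
  -- A's two passes, read off against Pall.1
  have hExt1 : DExt P1.1 Pall.1 := dext_foldLine refT P1
  have hs1 := aEncLine_fold candT ((PySem.Dict.empty : PySem.Dict String Int), 0) [] Pall.1 hExt1
  have hs2 := aEncLine_fold refT P1 [] Pall.1 (dext_refl _)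
  simp only [hvocab, hs1, hs2, List.nil_append, ← hP1, ← hPall]
  simp [Function.comp]
  exact ⟨fun _ _ => rfl, fun _ _ => rfl⟩
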